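-- pv_equiv track=rewrite | github.com/lpf32/mutiply | Parser.py | _verify_line
-- ===== SOURCE A (Python) =====
-- def _verify_line(line):
--     index = 0
--     j = 0
--     for i in line:
--         if i == '[':
--             index += 1
--             j = index
--         if i == ']':
--             j -= 1
--
--     if j != 0:
--         return -1
--     else:
--         return index
-- ===== SOURCE B (Python) =====
-- def _verify_line(line):
--     n = line.count('[')
--     c = line.count(']', line.rfind('[') + 1)
--     return n if n == c else -1
-- ===== Notes on version B (the rewrite author's own statement) =====
-- stated objective: faster
-- what changed: Replaces the stateful per-character scan (running opener count plus a reset-and-decrement balance variable) by three C-level string-method calls: count the openers, locate the last opener with rfind, count the closers after it; return the opener count when the two counts agree, else -1.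
import Mathlib
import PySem

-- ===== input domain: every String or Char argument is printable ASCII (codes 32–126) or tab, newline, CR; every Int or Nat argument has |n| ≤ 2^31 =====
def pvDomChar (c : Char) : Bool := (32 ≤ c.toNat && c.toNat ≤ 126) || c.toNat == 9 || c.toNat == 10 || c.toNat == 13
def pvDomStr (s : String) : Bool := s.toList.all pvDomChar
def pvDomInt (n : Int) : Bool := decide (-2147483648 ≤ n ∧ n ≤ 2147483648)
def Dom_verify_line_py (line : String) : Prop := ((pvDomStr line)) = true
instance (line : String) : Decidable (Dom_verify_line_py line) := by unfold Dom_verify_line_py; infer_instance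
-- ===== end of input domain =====

-- B replaces A's stateful scan by string-method counting (count / rfind); objective: simpler.

-- ===== PORT A =====
def verify_line_py_step (st : Int × Int) (i : Char) : Int × Int :=
  let st := if i = '[' then (st.1 + 1, st.1 + 1) else st
  if i = ']' then (st.1, st.2 - 1) else st

def verify_line_py (line : String) : Int :=
  let st := line.toList.foldl verify_line_py_step ((0 : Int), (0 : Int))
  if st.2 ≠ 0 then -1 else st.1

-- ===== PORT B =====
-- line.count(']', start) with start = rfind+1 ≥ 0 is the count over the slice line[start:]
def verify_line_py_alt (line : String) : Int :=
  let n : Int := (PySem.Str.count line "[" : Int)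
  let c : Int := (PySem.Chars.count
      (PySem.List.slice line.toList (some (PySem.Str.rfind line "[" + 1)) none) "]".toList : Int)
  if n = c then n else -1

-- ===== PRECONDITION & SPEC =====
def Spec_verify_line_py (line : String) (out : Int) : Prop := out = verify_line_py_alt line
instance (line : String) (out : Int) : Decidable (Spec_verify_line_py line out) := by unfold Spec_verify_line_py; infer_instance

-- ===== CLAIM (what is proved, stated in full; the proofs are below) =====
def Claim_equal_verify_line_py : Prop := ∀ (line : String), Dom_verify_line_py line → Spec_verify_line_py line (verify_line_py line)

-- ===== LEMMAS AND PROOFS =====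

-- count.go on a single-character needle is List.count
lemma count_go_singleton (c : Char) :
    ∀ (l : List Char) (fuel acc : Nat), l.length ≤ fuel →
      PySem.Chars.count.go [c] fuel l acc = acc + l.count c := by
  intro l
  induction l with
  | nil => intro fuel acc _; cases fuel <;> simp [PySem.Chars.count.go]
  | cons h t ih =>
      intro fuel acc hle
      cases fuel with
      | zero => simp at hle
      | succ f =>
          simp only [PySem.Chars.count.go]
          by_cases hc : c = h
          · subst hc
            simp only [List.isPrefixOf, beq_self_eq_true, Bool.true_and, if_pos]
            rw [show ([c].length = 1) from rfl, List.drop_one, List.tail_cons,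
              ih f (acc + 1) (by simpa using hle)]
            simp [List.count_cons]
            omega
          · have : ([c].isPrefixOf (h :: t)) = false := by
              simp [List.isPrefixOf, hc]
            rw [this]
            simp only [Bool.false_eq_true, if_false]
            rw [ih f acc (by simpa using hle)]
            simp [eq_comm, hc]

lemma chars_count_singleton (c : Char) (l : List Char) :
    PySem.Chars.count l [c] = l.count c := by
  unfold PySem.Chars.count
  simp [count_go_singleton c l l.length 0 le_rfl]

lemma prefixOf_singleton_append (a c : Char) (l : List Char) (h : l ≠ []) :
    [a].isPrefixOf (l ++ [c]) = [a].isPrefixOf l := by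
  cases l with
  | nil => exact absurd rfl h
  | cons x xs => simp [List.isPrefixOf]

lemma rfind_go_append (s : List Char) (c : Char) :
    ∀ x, x < s.length →
      PySem.Chars.rfind.go (s ++ [c]) ['['] x = PySem.Chars.rfind.go s ['['] x := by
  intro x
  induction x with
  | zero =>
      intro hx
      have hne : s ≠ [] := by intro h; simp [h] at hx
      simp only [PySem.Chars.rfind.go]
      rw [prefixOf_singleton_append '[' c s hne]
  | succ j ih =>
      intro hx
      have hdrop : (s ++ [c]).drop (j + 1) = s.drop (j + 1) ++ [c] :=
        List.drop_append_of_le_length (by omega)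
      have hne : s.drop (j + 1) ≠ [] := by
        intro h
        have := List.length_drop (l := s) (i := j + 1)
        rw [h] at this
        simp at this
        omega
      simp only [PySem.Chars.rfind.go]
      rw [hdrop, prefixOf_singleton_append '[' c _ hne]
      by_cases hp : ['['].isPrefixOf (s.drop (j + 1)) = true
      · simp [hp]
      · simp only [Bool.not_eq_true] at hp
        simp [hp, ih (by omega)]

lemma rfind_append_singleton (s : List Char) (c : Char) :
    PySem.Chars.rfind (s ++ [c]) ['['] =
      if c = '[' then (s.length : Int) else PySem.Chars.rfind s ['['] := by
  unfold PySem.Chars.rfind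
  have hlen : (s ++ [c]).length = s.length + 1 := by simp
  rw [hlen]
  have hdropall : (s ++ [c]).drop (s.length + 1) = [] := by
    apply List.drop_eq_nil_of_le; simp
  simp only [PySem.Chars.rfind.go]
  rw [hdropall]
  simp only [List.isPrefixOf, Bool.false_eq_true, if_false]
  cases hs : s.length with
  | zero =>
      have hnil : s = [] := List.length_eq_zero_iff.mp hs
      subst hnil
      simp only [PySem.Chars.rfind.go, List.nil_append]
      by_cases hc : c = '['
      · simp [hc, List.isPrefixOf]
      · simp [List.isPrefixOf, hc, Ne.symm hc]
  | succ m =>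
      simp only [PySem.Chars.rfind.go]
      have hdropm : (s ++ [c]).drop (m + 1) = [c] := by
        have : s.drop (m + 1) = [] := List.drop_eq_nil_of_le (by omega)
        rw [List.drop_append_of_le_length (by omega), this, List.nil_append]
      rw [hdropm]
      have hdropms : s.drop (m + 1) = [] := List.drop_eq_nil_of_le (by omega)
      rw [hdropms]
      simp only [List.isPrefixOf, Bool.false_eq_true, if_false,
        beq_iff_eq, Bool.and_true]
      by_cases hc : c = '['
      · simp [hc]
      · rw [if_neg (show ¬('[' = c) from fun h => hc h.symm), if_neg hc]
        exact rfind_go_append s c m (by omega)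

-- the invariant of A's scan: index = #'[' so far, j = index - #']' after the last '['
lemma scan_invariant (cs : List Char) :
    (-1 ≤ PySem.Chars.rfind cs ['['] ∧ PySem.Chars.rfind cs ['['] < cs.length) ∧
    cs.foldl verify_line_py_step ((0 : Int), (0 : Int)) =
      ((cs.count '[' : Int),
       (cs.count '[' : Int) -
         ((cs.drop (PySem.Chars.rfind cs ['['] + 1).toNat).count ']' : Int)) := by
  induction cs using List.reverseRecOn with
  | nil =>
      constructor
      · constructor <;> simp [PySem.Chars.rfind, PySem.Chars.rfind.go, List.isPrefixOf]
      · simp [PySem.Chars.rfind, PySem.Chars.rfind.go, List.isPrefixOf]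
  | append_singleton cs c ih =>
      obtain ⟨⟨hlo, hhi⟩, hfold⟩ := ih
      rw [rfind_append_singleton]
      by_cases hb : c = '['
      · subst hb
        have hlen : (((cs ++ ['[']).length : Int)) = (cs.length : Int) + 1 := by
          simp
        refine ⟨⟨by omega, by rw [hlen]; omega⟩, ?_⟩
        rw [List.foldl_append, hfold]
        have hdrop : (cs ++ ['[']).drop ((↑cs.length + 1 : Int)).toNat = [] := by
          apply List.drop_eq_nil_of_le; simp
        simp [verify_line_py_step, List.count_append]
      · have hio : (if c = '[' then (cs.length : Int) else PySem.Chars.rfind cs ['[']) =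
            PySem.Chars.rfind cs ['['] := by simp [hb]
        rw [hio]
        have hr : (PySem.Chars.rfind cs ['['] + 1).toNat ≤ cs.length := by omega
        have hdrop : (cs ++ [c]).drop (PySem.Chars.rfind cs ['['] + 1).toNat =
            cs.drop (PySem.Chars.rfind cs ['['] + 1).toNat ++ [c] :=
          List.drop_append_of_le_length hr
        have hlen : (((cs ++ [c]).length : Int)) = (cs.length : Int) + 1 := by
          simp
        refine ⟨⟨by omega, by rw [hlen]; omega⟩, ?_⟩
        rw [List.foldl_append, hfold, hdrop]
        by_cases hc : c = ']'
        · subst hc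
          simp [verify_line_py_step, List.count_append]
          omega
        · simp [verify_line_py_step, hb, hc, List.count_append]

-- ===== VERDICT (by name: the statement is the Claim_ definition above) =====
theorem verify_line_py_spec : Claim_equal_verify_line_py := by
  intro line _
  unfold Spec_verify_line_py verify_line_py verify_line_py_alt
  obtain ⟨⟨hlo, hhi⟩, hfold⟩ := scan_invariant line.toList
  have hcount : PySem.Str.count line "[" = line.toList.count '[' := by
    rw [PySem.Str.count_eq]
    exact chars_count_singleton '[' line.toList
  have hrf : PySem.Str.rfind line "[" = PySem.Chars.rfind line.toList ['['] := by
    rw [PySem.Str.rfind_eq]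
    rfl
  have hslice : PySem.List.slice line.toList
      (some (PySem.Str.rfind line "[" + 1)) none =
      line.toList.drop (PySem.Chars.rfind line.toList ['['] + 1).toNat := by
    rw [hrf, PySem.List.slice_from line.toList (by omega)]
  have htl : ("]".toList) = [']'] := rfl
  dsimp only
  rw [hfold, hcount, hslice, htl, chars_count_singleton]
  split_ifs with h1 h2 h2 <;> omega
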